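-- pv_equiv track=rewrite | github.com/ghen144/ai-showcase | backend/ex2_212133219_322625120.py | find_adjacent_treasures
-- ===== SOURCE A (Python) =====
-- def find_adjacent_treasures(current_location, current_state):
--     directions = [(0, 1), (0, -1), (1, 0), (-1, 0)]  # right, left, down, up
--     treasures = current_state["treasures"]
--     adjacent_treasures = []
--     for direction in directions:
--         next_location = (current_location[0] + direction[0], current_location[1] + direction[1])
--         for treasure_name, treasure_loc in treasures.items():
--             if treasure_loc == next_location:
--                 adjacent_treasures.append(treasure_name)
--     return adjacent_treasures
-- ===== SOURCE B (Python) =====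
-- def find_adjacent_treasures(current_location, current_state):
--     index = {}
--     for treasure_name, treasure_loc in current_state["treasures"].items():
--         index.setdefault(treasure_loc, []).append(treasure_name)
--     x, y = current_location
--     result = []
--     for next_location in ((x, y + 1), (x, y - 1), (x + 1, y), (x - 1, y)):
--         result += index.get(next_location, [])
--     return result
-- ===== Notes on version B (the rewrite author's own statement) =====
-- stated objective: idiomatic
-- what changed: B builds a location->names index once with setdefault and then does four O(1) dict lookups, instead of A's rescanning the whole treasure dict for each of the four directions.
import Mathlib
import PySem

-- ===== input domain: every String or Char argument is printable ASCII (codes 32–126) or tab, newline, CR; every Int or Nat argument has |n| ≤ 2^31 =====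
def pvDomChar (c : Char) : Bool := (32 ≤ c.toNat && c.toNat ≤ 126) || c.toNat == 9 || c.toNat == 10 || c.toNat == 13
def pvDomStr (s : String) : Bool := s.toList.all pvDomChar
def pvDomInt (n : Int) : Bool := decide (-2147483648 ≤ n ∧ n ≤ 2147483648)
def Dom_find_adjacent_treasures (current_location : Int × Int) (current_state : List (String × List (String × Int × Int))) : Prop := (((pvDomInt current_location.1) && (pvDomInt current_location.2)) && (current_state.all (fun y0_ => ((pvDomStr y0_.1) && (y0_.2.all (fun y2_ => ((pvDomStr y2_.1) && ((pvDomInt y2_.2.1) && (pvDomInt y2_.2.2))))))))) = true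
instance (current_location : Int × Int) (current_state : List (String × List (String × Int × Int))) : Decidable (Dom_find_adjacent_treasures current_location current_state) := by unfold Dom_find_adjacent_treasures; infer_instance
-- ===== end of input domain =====

-- B replaces A's four full scans of the treasure dict by one grouping pass building a
-- location→names index followed by four constant-time lookups (idiomatic; same output order).

-- ===== PORT A =====
def find_adjacent_treasures (current_location : Int × Int) (current_state : List (String × List (String × Int × Int))) : List String :=
  let directions : List (Int × Int) := [(0, 1), (0, -1), (1, 0), (-1, 0)]
  let treasures : List (String × Int × Int) := (((PySem.Dict.ofList current_state).get? "treasures").getD [])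
  directions.foldl
    (fun adjacent_treasures direction =>
      let next_location : Int × Int := (current_location.1 + direction.1, current_location.2 + direction.2)
      (PySem.Dict.ofList treasures).items.foldl
        (fun acc p => if p.2 == next_location then acc ++ [p.1] else acc)
        adjacent_treasures)
    []

-- ===== PORT B =====
def find_adjacent_treasures_alt (current_location : Int × Int) (current_state : List (String × List (String × Int × Int))) : List String :=
  let treasures : List (String × Int × Int) := (((PySem.Dict.ofList current_state).get? "treasures").getD [])
  let index : PySem.Dict (Int × Int) (List String) :=
    (PySem.Dict.ofList treasures).items.foldl
      (fun d p => d.modify p.2 [] (· ++ [p.1])) PySem.Dict.empty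
  let x := current_location.1
  let y := current_location.2
  ([(x, y + 1), (x, y - 1), (x + 1, y), (x - 1, y)] : List (Int × Int)).foldl
    (fun result next_location => result ++ index.getD next_location []) []

-- ===== PRECONDITION & SPEC =====
-- Pre_ excludes exactly the inputs where the key "treasures" is absent: there Python A
-- raises KeyError (and B raises too).
def Pre_find_adjacent_treasures (current_location : Int × Int) (current_state : List (String × List (String × Int × Int))) : Prop :=
  "treasures" ∈ current_state.map Prod.fst
instance (current_location : Int × Int) (current_state : List (String × List (String × Int × Int))) : Decidable (Pre_find_adjacent_treasures current_location current_state) := by unfold Pre_find_adjacent_treasures; infer_instance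

def pvWitness_find_adjacent_treasures : (Int × Int) × (List (String × List (String × Int × Int))) :=
  ((0, 0), [("treasures", [("gold", (0, 1)), ("silver", (2, 2))])])

def Spec_find_adjacent_treasures (current_location : Int × Int) (current_state : List (String × List (String × Int × Int))) (out : List String) : Prop := out = find_adjacent_treasures_alt current_location current_state
instance (current_location : Int × Int) (current_state : List (String × List (String × Int × Int))) (out : List String) : Decidable (Spec_find_adjacent_treasures current_location current_state out) := by unfold Spec_find_adjacent_treasures; infer_instance

-- ===== CLAIM (what is proved, stated in full; the proofs are below) =====
def Claim_equal_find_adjacent_treasures : Prop := ∀ (current_location : Int × Int) (current_state : List (String × List (String × Int × Int))), Dom_find_adjacent_treasures current_location current_state → Pre_find_adjacent_treasures current_location current_state → Spec_find_adjacent_treasures current_location current_state (find_adjacent_treasures current_location current_state)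

-- ===== LEMMAS AND PROOFS =====

-- B's index lookup at a location returns exactly the names of the treasures at that location, in order.
theorem pv_index_getD (ts : List (String × Int × Int)) (nl : Int × Int) :
    (ts.foldl (fun d p => d.modify p.2 [] (· ++ [p.1])) PySem.Dict.empty).getD nl []
      = (ts.filter (fun p => p.2 == nl)).map Prod.fst := by
  have h1 : ts.foldl (fun d p => d.modify p.2 [] (· ++ [p.1])) PySem.Dict.empty
      = (ts.map (fun p => (p.2, p.1))).foldl (fun d q => d.modify q.1 [] (· ++ [q.2])) PySem.Dict.empty := by
    rw [List.foldl_map]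
  rw [h1, PySem.Dict.getD_foldl_modify_append]
  simp [List.filter_map, List.map_map, Function.comp_def]

theorem pv_scan_eq (ts : List (String × Int × Int)) (nl : Int × Int) (acc : List String) :
    ts.foldl (fun acc p => if p.2 == nl then acc ++ [p.1] else acc) acc
      = acc ++ (ts.filter (fun p => p.2 == nl)).map Prod.fst := by
  exact PySem.List.foldl_append_if (fun p : String × Int × Int => p.2 == nl) Prod.fst ts acc

-- ===== VERDICT (by name: the statement is the Claim_ definition above) =====
theorem find_adjacent_treasures_spec : Claim_equal_find_adjacent_treasures := by
  intro cl cs _ _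
  unfold Spec_find_adjacent_treasures find_adjacent_treasures find_adjacent_treasures_alt
  simp only [List.foldl_cons, List.foldl_nil, pv_scan_eq, pv_index_getD, List.nil_append]
  norm_num [sub_eq_add_neg]
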